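-- pv_equiv track=rewrite | github.com/nidhitvaishnav/AlgorithmPractice | CodingChallenges/DNA.py | string_merge
-- ===== SOURCE A (Python) =====
-- def string_merge(refinedList, opStr):
-- #     if (len(refinedList) <= 1):
-- #         return refinedList
--     flag = [False]*len(refinedList)
--     for index1, i in enumerate(refinedList):
--         for index2, j in enumerate(refinedList):
--             if((flag[index1]==False and flag[index2]==False) and i[-3:]==j[0:3]):
--                 opStr+=i+j[3:]
--                 flag[index1]=True
--                 flag[index2]=True
--
--
--             #ifends
--         #for -ends
--     #for -ends
-- #     temp=refinedList[:]
-- #     for i in temp: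
-- #         if (opStr[-3:]==i[0:3]):
-- #             opStr+=i[3:]
-- # #     return string_merge(refinedList, opStr)
--     return(opStr)
-- ===== SOURCE B (Python) =====
-- def string_merge(refinedList, opStr):
--     # Bucket indices by 3-char prefix; per string, scan its suffix bucket from a
--     # saved pointer, skipping already-merged indices (each index skipped once).
--     buckets = {}
--     for idx, s in enumerate(refinedList):
--         buckets.setdefault(s[0:3], []).append(idx)
--     pos = {}
--     flag = [False] * len(refinedList)
--     for i1, s in enumerate(refinedList):
--         if flag[i1]:
--             continue
--         key = s[-3:]
--         bucket = buckets.get(key, [])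
--         k = pos.get(key, 0)
--         while k < len(bucket) and flag[bucket[k]]:
--             k += 1
--         pos[key] = k
--         if k < len(bucket):
--             j = bucket[k]
--             opStr += s + refinedList[j][3:]
--             flag[i1] = True
--             flag[j] = True
--     return opStr
-- ===== Notes on version B (the rewrite author's own statement) =====
-- stated objective: faster
-- what changed: Replaces A's quadratic nested scan over all index pairs by a one-pass bucket index: indices are grouped by 3-char prefix once, and each string's first live partner is found by advancing a saved per-bucket pointer that skips each merged index at most once.
import Mathlib
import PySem

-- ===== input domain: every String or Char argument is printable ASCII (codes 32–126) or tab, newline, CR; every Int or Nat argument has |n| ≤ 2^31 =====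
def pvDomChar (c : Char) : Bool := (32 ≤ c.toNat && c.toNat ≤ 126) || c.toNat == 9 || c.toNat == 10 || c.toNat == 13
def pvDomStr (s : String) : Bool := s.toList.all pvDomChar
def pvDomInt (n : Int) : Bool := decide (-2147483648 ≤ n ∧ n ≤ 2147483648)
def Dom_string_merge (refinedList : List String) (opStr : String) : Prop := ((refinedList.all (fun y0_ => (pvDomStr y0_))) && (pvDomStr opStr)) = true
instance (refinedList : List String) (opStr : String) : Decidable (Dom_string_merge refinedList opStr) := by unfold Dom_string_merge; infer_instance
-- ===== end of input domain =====

-- ===== PORT A =====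
-- B replaces A's quadratic nested scan by a prefix-bucket index with per-bucket pointers (objective: faster).
-- s[-3:]
def pvSfx3 (s : String) : String := PySem.Str.slice s (some (-3)) none
-- s[0:3]
def pvPre3 (s : String) : String := PySem.Str.slice s none (some 3)
-- s[3:]
def pvTail3 (s : String) : String := PySem.Str.slice s (some 3) none

-- body of A's inner 'for index2, j in enumerate(refinedList)' loop
def pvInnerStep (p : Int × String) (st : List Bool × String) (q : Int × String) : List Bool × String :=
  if (PySem.List.pyGetD st.1 p.1 false == false) && (PySem.List.pyGetD st.1 q.1 false == false)
      && (pvSfx3 p.2 == pvPre3 q.2) then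
    ((st.1.set p.1.toNat true).set q.1.toNat true, st.2 ++ p.2 ++ pvTail3 q.2)
  else st

def string_merge (refinedList : List String) (opStr : String) : String :=
  let st :=
    (PySem.List.enumerate refinedList 0).foldl
      (fun st1 p => (PySem.List.enumerate refinedList 0).foldl (pvInnerStep p) st1)
      (List.replicate refinedList.length false, opStr)
  st.2

-- ===== PORT B =====
-- buckets: 3-char prefix -> indices with that prefix, in order (Source B's first loop)
def pvBuckets (refinedList : List String) : PySem.Dict String (List Int) :=
  (PySem.List.enumerate refinedList 0).foldl
    (fun d p => d.modify (pvPre3 p.2) [] (· ++ [p.1])) PySem.Dict.empty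

-- Source B's 'while k < len(bucket) and flag[bucket[k]]: k += 1'
def pvSkip (flags : List Bool) (bucket : List Int) (k : Nat) : Nat :=
  if h : k < bucket.length then
    if PySem.List.pyGetD flags bucket[k] false then pvSkip flags bucket (k + 1) else k
  else k
termination_by bucket.length - k

-- body of Source B's main loop; state = (flag, (pos, opStr))
def pvAltStep (refinedList : List String) (buckets : PySem.Dict String (List Int))
    (st : List Bool × PySem.Dict String Nat × String) (p : Int × String) :
    List Bool × PySem.Dict String Nat × String :=
  if PySem.List.pyGetD st.1 p.1 false then st
  else
    let bucket := buckets.getD (pvSfx3 p.2) []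
    let k := pvSkip st.1 bucket (st.2.1.getD (pvSfx3 p.2) 0)
    let pos' := st.2.1.insert (pvSfx3 p.2) k
    if h : k < bucket.length then
      ((st.1.set p.1.toNat true).set (bucket[k]).toNat true,
        (pos', st.2.2 ++ p.2 ++ pvTail3 (PySem.List.pyGetD refinedList bucket[k] "")))
    else (st.1, (pos', st.2.2))

def string_merge_alt (refinedList : List String) (opStr : String) : String :=
  let st :=
    (PySem.List.enumerate refinedList 0).foldl
      (pvAltStep refinedList (pvBuckets refinedList))
      (List.replicate refinedList.length false, (PySem.Dict.empty, opStr))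
  st.2.2

-- ===== PRECONDITION & SPEC =====
def Spec_string_merge (refinedList : List String) (opStr : String) (out : String) : Prop := out = string_merge_alt refinedList opStr
instance (refinedList : List String) (opStr : String) (out : String) : Decidable (Spec_string_merge refinedList opStr out) := by unfold Spec_string_merge; infer_instance

-- ===== CLAIM (what is proved, stated in full; the proofs are below) =====
def Claim_equal_string_merge : Prop := ∀ (refinedList : List String) (opStr : String), Dom_string_merge refinedList opStr → Spec_string_merge refinedList opStr (string_merge refinedList opStr)

-- ===== LEMMAS AND PROOFS =====

-- the ordered list of indices whose string has 3-char prefix `key`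
def pvBkt (L : List String) (key : String) : List Int :=
  ((PySem.List.enumerate L 0).filter (fun q => pvPre3 q.2 == key)).map (·.1)

-- common per-outer-element behaviour both loops implement
def pvModelStep (L : List String) (st : List Bool × String) (p : Int × String) : List Bool × String :=
  if PySem.List.pyGetD st.1 p.1 false then st
  else
    match (PySem.List.enumerate L 0).find?
        (fun q => (PySem.List.pyGetD st.1 q.1 false == false) && (pvSfx3 p.2 == pvPre3 q.2)) with
    | none => st
    | some q => ((st.1.set p.1.toNat true).set q.1.toNat true, st.2 ++ p.2 ++ pvTail3 q.2)

-- pointer invariant of B's state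
def pvInv (L : List String) (flags : List Bool) (pos : PySem.Dict String Nat) : Prop :=
  ∀ key, pos.getD key 0 ≤ (pvBkt L key).length ∧
    ∀ m (hm : m < (pvBkt L key).length), m < pos.getD key 0 →
      PySem.List.pyGetD flags (pvBkt L key)[m] false = true

lemma pvGetD_set_mono (l : List Bool) (a : Nat) (i : Int)
    (h : PySem.List.pyGetD l i false = true) :
    PySem.List.pyGetD (l.set a true) i false = true := by
  unfold PySem.List.pyGetD PySem.List.pyGet? PySem.List.pyIdx? at *
  simp only [List.length_set] at *
  split_ifs at * <;> (simp_all [List.getElem?_set]; try (split_ifs at * <;> simp_all))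

lemma pvGetD_set2_mono (l : List Bool) (a b : Nat) (i : Int)
    (h : PySem.List.pyGetD l i false = true) :
    PySem.List.pyGetD ((l.set a true).set b true) i false = true := by
  exact pvGetD_set_mono _ _ _ (pvGetD_set_mono _ _ _ h)

lemma pvGetD_set2_self (l : List Bool) (a b : Nat) (ha : a < l.length) :
    PySem.List.pyGetD ((l.set a true).set b true) (a : Int) false = true := by
  unfold PySem.List.pyGetD PySem.List.pyGet? PySem.List.pyIdx?
  simp only [List.length_set]
  rw [if_pos (by positivity), if_pos (by exact_mod_cast ha)]
  by_cases hba : b = a <;> simp [List.getElem?_set, hba, ha]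

lemma pvMem_enum_valid (L : List String) (p : Int × String)
    (hp : p ∈ PySem.List.enumerate L 0) :
    0 ≤ p.1 ∧ p.1.toNat < L.length ∧ p.2 = PySem.List.pyGetD L p.1 "" := by
  rw [PySem.List.mem_enumerate_iff] at hp
  obtain ⟨k, hk, rfl⟩ := hp
  refine ⟨by simp, by simpa using hk, ?_⟩
  rw [PySem.List.pyGetD_eq_getElem L "" (by simp) (by simpa using hk)]
  simp

-- A's inner loop once flag[index1] is set: no-op
lemma pvInner_dead (p : Int × String) (l : List (Int × String)) (st : List Bool × String)
    (h : PySem.List.pyGetD st.1 p.1 false = true) :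
    l.foldl (pvInnerStep p) st = st := by
  induction l with
  | nil => rfl
  | cons q l ih => simp [pvInnerStep, h, ih]

-- A's inner loop while flag[index1] is clear: first match wins
lemma pvInner_live (p : Int × String) (l : List (Int × String)) (flags : List Bool) (op : String)
    (h0 : 0 ≤ p.1) (h1 : p.1.toNat < flags.length)
    (hp : PySem.List.pyGetD flags p.1 false = false) :
    l.foldl (pvInnerStep p) (flags, op) =
      match l.find? (fun q => (PySem.List.pyGetD flags q.1 false == false) && (pvSfx3 p.2 == pvPre3 q.2)) with
      | none => (flags, op)
      | some q => ((flags.set p.1.toNat true).set q.1.toNat true, op ++ p.2 ++ pvTail3 q.2) := by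
  induction l with
  | nil => rfl
  | cons q l ih =>
    rw [List.foldl_cons, List.find?_cons]
    by_cases hq : ((PySem.List.pyGetD flags q.1 false == false) && (pvSfx3 p.2 == pvPre3 q.2)) = true
    · simp only [hq]
      
      have hstep : pvInnerStep p (flags, op) q =
          ((flags.set p.1.toNat true).set q.1.toNat true, op ++ p.2 ++ pvTail3 q.2) := by
        simp only [pvInnerStep, hp]
        simp only [Bool.and_eq_true] at hq
        simp [hq.1, hq.2]
      rw [hstep]
      exact pvInner_dead p l _ (by have := pvGetD_set2_self flags p.1.toNat q.1.toNat h1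
                                   simpa [Int.toNat_of_nonneg h0] using this)
    · rw [Bool.not_eq_true] at hq
      simp only [hq]
      have hstep : pvInnerStep p (flags, op) q = (flags, op) := by
        simp only [pvInnerStep, Bool.and_assoc, hq, Bool.and_false]
        rfl
      rw [hstep, ih]

-- A's fold is the model fold
lemma pvModelStep_len (L : List String) (st : List Bool × String) (p : Int × String) :
    (pvModelStep L st p).1.length = st.1.length := by
  unfold pvModelStep
  split
  · rfl
  · split <;> simp

lemma pvA_model (L : List String) (l : List (Int × String))
    (hl : ∀ p ∈ l, p ∈ PySem.List.enumerate L 0) :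
    ∀ (flags : List Bool) (op : String), flags.length = L.length →
    l.foldl (fun st1 p => (PySem.List.enumerate L 0).foldl (pvInnerStep p) st1) (flags, op) =
      l.foldl (pvModelStep L) (flags, op) := by
  induction l with
  | nil => intro flags op _; rfl
  | cons p l ih =>
    intro flags op hlen
    obtain ⟨h0, h1, _⟩ := pvMem_enum_valid L p (hl p (by simp))
    have hstep : (PySem.List.enumerate L 0).foldl (pvInnerStep p) (flags, op) =
        pvModelStep L (flags, op) p := by
      by_cases hflag : PySem.List.pyGetD flags p.1 false = true
      · rw [pvInner_dead p _ _ hflag]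
        unfold pvModelStep
        rw [if_pos hflag]
      · have hflag' : PySem.List.pyGetD flags p.1 false = false := by
          simpa using hflag
        rw [pvInner_live p _ flags op h0 (hlen ▸ h1) hflag']
        unfold pvModelStep
        rw [if_neg (by simp [hflag'])]
    rw [List.foldl_cons, List.foldl_cons, hstep]
    exact ih (fun q hq => hl q (by simp [hq])) _ _ ((pvModelStep_len L (flags, op) p).trans hlen)

-- the bucket dictionary is pvBkt
lemma pvBuckets_getD_aux (l : List (Int × String)) :
    ∀ (d : PySem.Dict String (List Int)) (key : String),
    (l.foldl (fun d p => d.modify (pvPre3 p.2) [] (· ++ [p.1])) d).getD key [] =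
      d.getD key [] ++ (l.filter (fun q => pvPre3 q.2 == key)).map (·.1) := by
  induction l with
  | nil => intro d key; simp
  | cons p l ih =>
    intro d key
    rw [List.foldl_cons, ih, List.filter_cons]
    by_cases h : (pvPre3 p.2 == key) = true
    · have hk : key = pvPre3 p.2 := (beq_iff_eq.mp h).symm
      subst hk
      rw [PySem.Dict.getD_modify, if_pos rfl]
      simp
    · have hne : ¬ key = pvPre3 p.2 := fun e => h (by simp [e])
      rw [PySem.Dict.getD_modify, if_neg hne]
      simp [h]

lemma pvBuckets_getD (L : List String) (key : String) :
    (pvBuckets L).getD key [] = pvBkt L key := by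
  unfold pvBuckets pvBkt
  rw [pvBuckets_getD_aux]
  simp [PySem.Dict.getD, PySem.Dict.get?, PySem.Dict.empty]


lemma pvSkip_spec (flags : List Bool) (bucket : List Int) (k0 : Nat) (hk0 : k0 ≤ bucket.length)
    (hbelow : ∀ m (hm : m < bucket.length), m < k0 → PySem.List.pyGetD flags bucket[m] false = true) :
    pvSkip flags bucket k0 ≤ bucket.length ∧
    (∀ m (hm : m < bucket.length), m < pvSkip flags bucket k0 →
      PySem.List.pyGetD flags bucket[m] false = true) ∧
    (∀ h : pvSkip flags bucket k0 < bucket.length,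
      PySem.List.pyGetD flags bucket[pvSkip flags bucket k0] false = false) := by
  fun_induction pvSkip flags bucket k0 with
  | case1 k h hflag ih =>
    refine ih (by omega) ?_
    intro m hm hmk
    by_cases hmk' : m < k
    · exact hbelow m hm hmk'
    · have : m = k := by omega
      subst this; exact hflag
  | case2 k h hflag =>
    exact ⟨by omega, fun m hm hmk => hbelow m hm hmk, fun _ => by simpa using hflag⟩
  | case3 k h =>
    exact ⟨by omega, fun m hm hmk => hbelow m hm hmk, fun hlt => absurd hlt h⟩


-- the model's find? over all pairs, through the bucket
lemma pvFind_bucket (L : List String) (flags : List Bool) (s : String) :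
    (PySem.List.enumerate L 0).find?
        (fun q => (PySem.List.pyGetD flags q.1 false == false) && (pvSfx3 s == pvPre3 q.2)) =
      Option.map (fun j => (j, PySem.List.pyGetD L j ""))
        ((pvBkt L (pvSfx3 s)).find? (fun j => PySem.List.pyGetD flags j false == false)) := by
  have hcore : (pvBkt L (pvSfx3 s)).find? (fun j => PySem.List.pyGetD flags j false == false) =
      Option.map (·.1) ((PySem.List.enumerate L 0).find?
        (fun q => (PySem.List.pyGetD flags q.1 false == false) && (pvSfx3 s == pvPre3 q.2))) := by
    unfold pvBkt
    rw [List.find?_map, List.find?_filter]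
    refine congrArg _ (congrFun (congrArg List.find? (funext fun q => ?_)) _)
    simp only [Function.comp, Bool.decide_and, Bool.decide_eq_true]
    rw [Bool.and_comm, BEq.comm]
    rw [BEq.comm (a := pvPre3 q.2)]
  rw [hcore]
  cases hf : (PySem.List.enumerate L 0).find?
      (fun q => (PySem.List.pyGetD flags q.1 false == false) && (pvSfx3 s == pvPre3 q.2)) with
  | none => simp
  | some q =>
    have hq := pvMem_enum_valid L q (List.mem_of_find?_eq_some hf)
    simp only [Option.map_some]
    rw [← hq.2.2]


-- B's step, and then fold, is the model step/fold (plus the pointer dictionary)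
lemma pvStep_corr (L : List String) (flags : List Bool) (pos : PySem.Dict String Nat)
    (op : String) (p : Int × String) (hInv : pvInv L flags pos) :
    ∃ pos', pvAltStep L (pvBuckets L) (flags, (pos, op)) p =
        ((pvModelStep L (flags, op) p).1, (pos', (pvModelStep L (flags, op) p).2)) ∧
      pvInv L (pvModelStep L (flags, op) p).1 pos' := by
  by_cases hflag : PySem.List.pyGetD flags p.1 false = true
  · have hM : pvModelStep L (flags, op) p = (flags, op) := by
      unfold pvModelStep; rw [if_pos hflag]
    have hA : pvAltStep L (pvBuckets L) (flags, (pos, op)) p = (flags, (pos, op)) := by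
      unfold pvAltStep; rw [if_pos hflag]
    exact ⟨pos, by rw [hA, hM], by rw [hM]; exact hInv⟩
  · have hflag' : PySem.List.pyGetD flags p.1 false = false := by simpa using hflag
    set key := pvSfx3 p.2 with hkey
    set B := pvBkt L key with hB
    set k0 := pos.getD key 0 with hk0def
    obtain ⟨hk0, hbelow⟩ := hInv key
    set r := pvSkip flags B k0 with hrdef
    obtain ⟨hr_le, hflagged, hfound⟩ := pvSkip_spec flags B k0 hk0 hbelow
    simp only [← hrdef] at hr_le hflagged hfound
    simp only [← hB, ← hk0def] at hk0 hbelow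
    by_cases hr : r < B.length
    · have hBfind : B.find? (fun j => PySem.List.pyGetD flags j false == false) = some B[r] := by
        rw [List.find?_eq_some_iff_getElem]
        refine ⟨by simp [hfound hr], r, hr, rfl, fun j hj => by simp [hflagged j (by omega) hj]⟩
      have hM : pvModelStep L (flags, op) p =
          ((flags.set p.1.toNat true).set (B[r]).toNat true,
            op ++ p.2 ++ pvTail3 (PySem.List.pyGetD L B[r] "")) := by
        unfold pvModelStep
        rw [if_neg (by simp [hflag'])]
        rw [pvFind_bucket, ← hkey, ← hB, hBfind]
        rfl
      have hA : pvAltStep L (pvBuckets L) (flags, (pos, op)) p =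
          ((flags.set p.1.toNat true).set (B[r]).toNat true,
            (pos.insert key r,
              op ++ p.2 ++ pvTail3 (PySem.List.pyGetD L B[r] ""))) := by
        unfold pvAltStep
        rw [if_neg (by simp [hflag'])]
        simp only [pvBuckets_getD, ← hkey, ← hB, ← hk0def, ← hrdef]
        rw [dif_pos hr]
      refine ⟨pos.insert key r, by rw [hA, hM], ?_⟩
      rw [hM]
      intro key'
      by_cases hkk : key' = key
      · subst hkk
        rw [PySem.Dict.getD_insert, if_pos rfl]
        exact ⟨hr_le, fun m hm hmr => pvGetD_set2_mono _ _ _ _ (hflagged m hm hmr)⟩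
      · rw [PySem.Dict.getD_insert, if_neg hkk]
        exact ⟨(hInv key').1, fun m hm hmr => pvGetD_set2_mono _ _ _ _ ((hInv key').2 m hm hmr)⟩
    · have hBfind : B.find? (fun j => PySem.List.pyGetD flags j false == false) = none := by
        rw [List.find?_eq_none]
        intro x hx
        obtain ⟨m, hm, rfl⟩ := List.mem_iff_getElem.mp hx
        simp [hflagged m hm (by omega)]
      have hM : pvModelStep L (flags, op) p = (flags, op) := by
        unfold pvModelStep
        rw [if_neg (by simp [hflag'])]
        rw [pvFind_bucket, ← hkey, ← hB, hBfind]
        rfl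
      have hA : pvAltStep L (pvBuckets L) (flags, (pos, op)) p =
          (flags, (pos.insert key r, op)) := by
        unfold pvAltStep
        rw [if_neg (by simp [hflag'])]
        simp only [pvBuckets_getD, ← hkey, ← hB, ← hk0def, ← hrdef]
        rw [dif_neg hr]
      refine ⟨pos.insert key r, by rw [hA, hM], ?_⟩
      rw [hM]
      intro key'
      by_cases hkk : key' = key
      · subst hkk
        rw [PySem.Dict.getD_insert, if_pos rfl]
        exact ⟨hr_le, fun m hm hmr => hflagged m hm hmr⟩
      · rw [PySem.Dict.getD_insert, if_neg hkk]
        exact hInv key'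

lemma pvB_model (L : List String) (l : List (Int × String)) :
    ∀ (flags : List Bool) (pos : PySem.Dict String Nat) (op : String), pvInv L flags pos →
    ∃ pos', l.foldl (pvAltStep L (pvBuckets L)) (flags, (pos, op)) =
      ((l.foldl (pvModelStep L) (flags, op)).1, (pos', (l.foldl (pvModelStep L) (flags, op)).2)) := by
  induction l with
  | nil => exact fun flags pos op _ => ⟨pos, rfl⟩
  | cons p l ih =>
    intro flags pos op hInv
    obtain ⟨pos1, hstep, hInv1⟩ := pvStep_corr L flags pos op p hInv
    obtain ⟨pos2, h2⟩ := ih (pvModelStep L (flags, op) p).1 pos1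
      (pvModelStep L (flags, op) p).2 hInv1
    refine ⟨pos2, ?_⟩
    rw [List.foldl_cons, hstep, List.foldl_cons, h2]

-- ===== VERDICT (by name: the statement is the Claim_ definition above) =====
theorem string_merge_spec : Claim_equal_string_merge := by
  intro L op _
  unfold Spec_string_merge string_merge string_merge_alt
  have hA := pvA_model L (PySem.List.enumerate L 0) (fun p hp => hp)
    (List.replicate L.length false) op (by simp)
  have hB := pvB_model L (PySem.List.enumerate L 0)
    (List.replicate L.length false) PySem.Dict.empty op
    (by intro key; constructor <;> simp [PySem.Dict.getD, PySem.Dict.get?, PySem.Dict.empty])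
  obtain ⟨pos', hB⟩ := hB
  simp only [hA, hB]
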